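-- pv_equiv track=rewrite | github.com/e34106052/askllm | policies.py | recent_effective_evidence
-- ===== SOURCE A (Python) =====
-- from typing import List
--
-- def is_tool_error(text: str) -> bool:
--     value = (text or "").lower()
--     error_markers = [
--         "錯誤",
--         "失敗",
--         "exception",
--         "traceback",
--         "connection failed",
--         "http 錯誤",
--         "http error",
--         "timeout",
--         "超時",
--         "找不到",
--         "未知的工具",
--         "未提供有效",
--         "服務端錯誤",
--     ]
--     return any(marker in value for marker in error_markers)
--
-- def recent_effective_evidence(tool_outputs: List[str], max_items: int = 3) -> List[str]:
--     useful = []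
--     for item in reversed(tool_outputs):
--         if not item:
--             continue
--         if is_tool_error(item):
--             continue
--         useful.append(item[:800])
--         if len(useful) >= max_items:
--             break
--     return list(reversed(useful))
-- ===== SOURCE B (Python) =====
-- from typing import List
--
-- def is_tool_error(text: str) -> bool:
--     value = (text or "").lower()
--     error_markers = [
--         "錯誤",
--         "失敗",
--         "exception",
--         "traceback",
--         "connection failed",
--         "http 錯誤",
--         "http error",
--         "timeout",
--         "超時",
--         "找不到",
--         "未知的工具",
--         "未提供有效",
--         "服務端錯誤",
--     ]
--     return any(marker in value for marker in error_markers)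
--
-- def recent_effective_evidence(tool_outputs: List[str], max_items: int = 3) -> List[str]:
--     if max_items <= 0:
--         return []
--     filtered = [item[:800] for item in tool_outputs if item and not is_tool_error(item)]
--     return filtered[-max_items:]
-- ===== Notes on version B (the rewrite author's own statement) =====
-- stated objective: simpler
-- what changed: B replaces A's reversed walk with an early break and a second reversal by one forward filter/truncate pass followed by a tail slice filtered[-max_items:], returning [] when max_items <= 0.
-- intended difference: For max_items <= 0 with at least one non-empty non-error output, A's append-then-check loop still returns one item while B returns [], which is the intended meaning of asking for at most zero items. — e.g. on recent_effective_evidence(["ok"], 0): A returns ["ok"], B returns []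
import Mathlib
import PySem

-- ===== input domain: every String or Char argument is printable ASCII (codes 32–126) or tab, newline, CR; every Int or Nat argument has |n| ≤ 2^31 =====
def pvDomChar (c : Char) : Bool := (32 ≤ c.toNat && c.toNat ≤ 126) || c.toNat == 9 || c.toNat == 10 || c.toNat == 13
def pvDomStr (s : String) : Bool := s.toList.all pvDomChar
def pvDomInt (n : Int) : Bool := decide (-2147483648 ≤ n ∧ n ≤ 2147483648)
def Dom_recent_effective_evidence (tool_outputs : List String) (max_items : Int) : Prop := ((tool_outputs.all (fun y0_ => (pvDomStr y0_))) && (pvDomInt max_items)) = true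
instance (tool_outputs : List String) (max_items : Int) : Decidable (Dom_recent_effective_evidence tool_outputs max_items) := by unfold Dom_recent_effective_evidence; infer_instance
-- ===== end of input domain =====

-- B filters forward once and returns the tail slice filtered[-max_items:] ([] for max_items ≤ 0)
-- instead of A's reversed walk with an early break; objective: simpler.

-- ===== PORT A =====
-- shared helper: Python's is_tool_error (used verbatim by both programs)
def is_tool_error (text : String) : Bool :=
  let value := PySem.Str.lower (if text == "" then "" else text)
  let error_markers : List String :=
    ["錯誤", "失敗", "exception", "traceback", "connection failed", "http 錯誤",
     "http error", "timeout", "超時", "找不到", "未知的工具", "未提供有效", "服務端錯誤"]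
  error_markers.any (fun marker => PySem.Str.isIn marker value)

-- A's loop over reversed(tool_outputs), accumulating 'useful' and breaking at max_items
def pvALoop (max_items : Int) : List String → List String → List String
  | [], useful => useful
  | item :: rest, useful =>
    if item == "" then pvALoop max_items rest useful
    else if is_tool_error item then pvALoop max_items rest useful
    else
      let useful' := useful ++ [PySem.Str.slice item none (some 800)]
      if max_items ≤ (useful'.length : Int) then useful'
      else pvALoop max_items rest useful'

def recent_effective_evidence (tool_outputs : List String) (max_items : Int) : List String :=
  (pvALoop max_items tool_outputs.reverse []).reverse

-- ===== PORT B =====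
def recent_effective_evidence_alt (tool_outputs : List String) (max_items : Int) : List String :=
  if max_items ≤ 0 then []
  else
    let filtered := (tool_outputs.filter (fun item => item != "" && !is_tool_error item)).map
      (fun item => PySem.Str.slice item none (some 800))
    PySem.List.slice filtered (some (-max_items)) none

-- ===== PRECONDITION & SPEC =====
-- For max_items ≤ 0 with at least one non-empty non-error output, A's append-then-check loop
-- still returns one item while B returns [], which is the intended meaning of asking for at
-- most zero items.
def D_recent_effective_evidence (tool_outputs : List String) (max_items : Int) : Prop :=
  max_items ≤ 0 ∧ ∃ item ∈ tool_outputs, item ≠ "" ∧ is_tool_error item = false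
instance (tool_outputs : List String) (max_items : Int) : Decidable (D_recent_effective_evidence tool_outputs max_items) := by unfold D_recent_effective_evidence; infer_instance

def Spec_recent_effective_evidence (tool_outputs : List String) (max_items : Int) (out : List String) : Prop := ¬ D_recent_effective_evidence tool_outputs max_items → out = recent_effective_evidence_alt tool_outputs max_items
instance (tool_outputs : List String) (max_items : Int) (out : List String) : Decidable (Spec_recent_effective_evidence tool_outputs max_items out) := by unfold Spec_recent_effective_evidence; infer_instance

def pvDiffWitness_recent_effective_evidence : List String × Int := (["ok"], 0)
def pvDiffWitnessOut_recent_effective_evidence : (List String) × (List String) := (["ok"], [])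

-- ===== CLAIM (what is proved, stated in full; the proofs are below) =====
def Claim_unchanged_recent_effective_evidence : Prop := ∀ (tool_outputs : List String) (max_items : Int), Dom_recent_effective_evidence tool_outputs max_items → Spec_recent_effective_evidence tool_outputs max_items (recent_effective_evidence tool_outputs max_items)
def Claim_changed_recent_effective_evidence : Prop := Dom_recent_effective_evidence (pvDiffWitness_recent_effective_evidence.1) (pvDiffWitness_recent_effective_evidence.2) ∧ D_recent_effective_evidence (pvDiffWitness_recent_effective_evidence.1) (pvDiffWitness_recent_effective_evidence.2) ∧ recent_effective_evidence (pvDiffWitness_recent_effective_evidence.1) (pvDiffWitness_recent_effective_evidence.2) = pvDiffWitnessOut_recent_effective_evidence.1 ∧ recent_effective_evidence_alt (pvDiffWitness_recent_effective_evidence.1) (pvDiffWitness_recent_effective_evidence.2) = pvDiffWitnessOut_recent_effective_evidence.2 ∧ pvDiffWitnessOut_recent_effective_evidence.1 ≠ pvDiffWitnessOut_recent_effective_evidence.2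
def Claim_exact_recent_effective_evidence : Prop := ∀ (tool_outputs : List String) (max_items : Int), Dom_recent_effective_evidence tool_outputs max_items → D_recent_effective_evidence tool_outputs max_items → recent_effective_evidence tool_outputs max_items ≠ recent_effective_evidence_alt tool_outputs max_items

-- ===== LEMMAS AND PROOFS =====

-- A's loop takes the first max(M - |useful|, 1) good (truncated) items of l, appended to useful.
theorem pvALoop_eq (M : Int) (l : List String) : ∀ useful : List String,
    pvALoop M l useful =
      useful ++ (((l.filter (fun item => item != "" && !is_tool_error item)).map
        (fun item => PySem.Str.slice item none (some 800))).take
          (max (M - useful.length) 1).toNat) := by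
  induction l with
  | nil => intro useful; simp [pvALoop]
  | cons item rest ih =>
    intro useful
    by_cases h1 : item = ""
    · simp [pvALoop, h1]
      exact ih useful
    · by_cases h2 : is_tool_error item
      · simp [pvALoop, h1, h2]
        exact ih useful
      · have hm : (max (M - useful.length) 1).toNat ≥ 1 := by omega
        simp only [pvALoop, beq_iff_eq, h1, if_false, h2, Bool.false_eq_true, if_false]
        by_cases h3 : M ≤ ((useful ++ [PySem.Str.slice item none (some 800)]).length : Int)
        · simp only [h3, if_true]
          have : (max (M - useful.length) 1).toNat = 1 := by
            simp at h3; omega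
          simp [h1, h2, this]
        · simp only [h3, if_false]
          rw [ih]
          obtain ⟨n, hn⟩ : ∃ n, (max (M - (useful.length : Int)) 1).toNat = n + 1 :=
            ⟨(max (M - (useful.length : Int)) 1).toNat - 1, by omega⟩
          have h4 : (max (M - ((useful ++ [PySem.Str.slice item none (some 800)]).length : Int)) 1).toNat = n := by
            simp at h3 ⊢; omega
          rw [h4, hn]
          simp [h1, h2, List.take_succ_cons]

theorem recent_effective_evidence_eq_drop (tool_outputs : List String) (max_items : Int) :
    recent_effective_evidence tool_outputs max_items =
      (let filtered := (tool_outputs.filter (fun item => item != "" && !is_tool_error item)).map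
          (fun item => PySem.Str.slice item none (some 800))
       filtered.drop (filtered.length - (max max_items 1).toNat)) := by
  unfold recent_effective_evidence
  rw [pvALoop_eq]
  simp only [List.length_nil, Int.natCast_zero, sub_zero, List.nil_append,
    List.filter_reverse, List.map_reverse, List.take_reverse, List.reverse_reverse]

-- ===== VERDICT (by name: the statements are the Claim_ definitions above) =====
theorem recent_effective_evidence_spec : Claim_unchanged_recent_effective_evidence := by
  intro tool_outputs max_items _ hnd
  rw [recent_effective_evidence_eq_drop]
  unfold recent_effective_evidence_alt
  by_cases hm : max_items ≤ 0
  · have hno : ∀ item ∈ tool_outputs, ¬(item ≠ "" ∧ is_tool_error item = false) := by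
      intro item hmem hgood
      exact hnd ⟨hm, item, hmem, hgood⟩
    have hf : tool_outputs.filter (fun item => item != "" && !is_tool_error item) = [] := by
      rw [List.filter_eq_nil_iff]
      intro a ha
      have := hno a ha
      simp only [bne_iff_ne, Bool.and_eq_true, Bool.not_eq_true'] at *
      tauto
    simp [hf, hm]
  · rw [if_neg hm]
    have hmax : max max_items 1 = max_items := by omega
    have hcast : -max_items = -((max_items.toNat : Nat) : Int) := by omega
    simp only [hmax]
    rw [hcast, PySem.List.slice_from_neg_natCast _ _ (by omega)]

theorem recent_effective_evidence_changed : Claim_changed_recent_effective_evidence := by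
  unfold Claim_changed_recent_effective_evidence; decide

theorem recent_effective_evidence_tight : Claim_exact_recent_effective_evidence := by
  intro tool_outputs max_items _ hD
  obtain ⟨hm, item, hmem, hne, herr⟩ := hD
  rw [recent_effective_evidence_eq_drop]
  unfold recent_effective_evidence_alt
  rw [if_pos hm]
  simp only []
  intro hcontra
  have hfmem : item ∈ tool_outputs.filter (fun item => item != "" && !is_tool_error item) := by
    rw [List.mem_filter]
    exact ⟨hmem, by simp [hne, herr]⟩
  have hlen : 0 < (tool_outputs.filter (fun item => item != "" && !is_tool_error item)).length :=
    List.length_pos_of_mem hfmem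
  have hmax : (max max_items 1).toNat = 1 := by omega
  rw [hmax] at hcontra
  have hlc := congrArg List.length hcontra
  simp only [List.length_drop, List.length_map, List.length_nil] at hlc
  omega
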